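-- pv_equiv track=rewrite | github.com/iofficialnene/fx-backend | backend/strategy.py | confidence_pct
-- ===== SOURCE A (Python) =====
-- def confidence_pct(weekly, daily, h4, h1):
--     """Confidence % measured as how many tf show same Bullish/Bearish (ignore Sideways/None)."""
--     vals = []
--     for v in (weekly, daily, h4, h1):
--         if v in ("Bullish", "Bearish"):
--             vals.append(v)
--     if not vals:
--         return 0
--     # majority match
--     bullish = vals.count("Bullish")
--     bearish = vals.count("Bearish")
--     top = max(bullish, bearish)
--     return int(round(top / len(vals) * 100))
-- ===== SOURCE B (Python) =====
-- # Answer table: for each reachable (bullish, bearish) count pair of the four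
-- # timeframes, the pre-computed confidence percentage round(max/total*100).
-- _TABLE = {
--     (0, 0): 0,
--     (1, 0): 100, (0, 1): 100,
--     (2, 0): 100, (1, 1): 50, (0, 2): 100,
--     (3, 0): 100, (2, 1): 67, (1, 2): 67, (0, 3): 100,
--     (4, 0): 100, (3, 1): 75, (2, 2): 50, (1, 3): 75, (0, 4): 100,
-- }
--
-- def confidence_pct(weekly, daily, h4, h1):
--     """Confidence % measured as how many tf show same Bullish/Bearish (ignore Sideways/None)."""
--     args = (weekly, daily, h4, h1)
--     bull = sum(v == "Bullish" for v in args)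
--     bear = sum(v == "Bearish" for v in args)
--     return _TABLE[(bull, bear)]
-- ===== Notes on version B (the rewrite author's own statement) =====
-- stated objective: alternative
-- what changed: Replaced the build-a-list-then-count-twice-max-and-float-round computation with a table-driven lookup: count Bullish and Bearish votes once and return the precomputed percentage from a 15-entry dict keyed by the (bullish, bearish) count pair, so no max, division or rounding happens at runtime.
import Mathlib
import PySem

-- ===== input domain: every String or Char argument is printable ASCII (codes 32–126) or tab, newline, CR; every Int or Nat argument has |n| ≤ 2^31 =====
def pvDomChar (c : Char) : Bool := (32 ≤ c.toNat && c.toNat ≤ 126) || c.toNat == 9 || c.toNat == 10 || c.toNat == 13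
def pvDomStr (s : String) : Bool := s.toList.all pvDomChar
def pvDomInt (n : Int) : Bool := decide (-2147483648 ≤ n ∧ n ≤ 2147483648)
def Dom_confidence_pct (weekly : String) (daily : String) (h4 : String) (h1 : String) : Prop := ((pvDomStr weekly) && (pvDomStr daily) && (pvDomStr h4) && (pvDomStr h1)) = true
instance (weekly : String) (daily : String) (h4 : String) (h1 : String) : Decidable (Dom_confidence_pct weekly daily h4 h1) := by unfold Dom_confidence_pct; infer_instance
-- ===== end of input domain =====

-- B replaces A's list-build/count-twice/float-round computation by counting the two vote kinds and returning a precomputed percentage from a 15-entry lookup table (alternative decomposition, same cost).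


-- ===== PORT A =====
-- int(round(x)) for x = num/den (den > 0): round-half-even on the exact rational.
-- Exact for A here: num/den is top*100/len with len <= 4, where the float quotient
-- rounds to the same nearest integer and no .5 ties occur.
def pyRoundDiv (num den : Int) : Int :=
  let q := PySem.Int.floordiv num den
  let r := num - q * den
  if 2 * r < den then q
  else if 2 * r > den then q + 1
  else if q % 2 = 0 then q else q + 1

-- literal transliteration of A: build the filtered list, count twice, take max, round
def confidence_pct (weekly : String) (daily : String) (h4 : String) (h1 : String) : Int :=
  let vals := [weekly, daily, h4, h1].foldl
    (fun acc v => if v = "Bullish" ∨ v = "Bearish" then acc ++ [v] else acc) []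
  if vals = [] then 0
  else
    let bullish : Int := PySem.List.count vals "Bullish"
    let bearish : Int := PySem.List.count vals "Bearish"
    let top := max bullish bearish
    pyRoundDiv (top * 100) (vals.length : Int)

-- ===== PORT B =====
-- B is table-driven: the answer for each reachable (bullish, bearish) count pair is precomputed
def pvTable : PySem.Dict (Int × Int) Int := PySem.Dict.ofList
  [((0, 0), 0),
   ((1, 0), 100), ((0, 1), 100),
   ((2, 0), 100), ((1, 1), 50), ((0, 2), 100),
   ((3, 0), 100), ((2, 1), 67), ((1, 2), 67), ((0, 3), 100),
   ((4, 0), 100), ((3, 1), 75), ((2, 2), 50), ((1, 3), 75), ((0, 4), 100)]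

-- transliteration of B: count the two vote kinds, look the pair up in the table.
-- Python's _TABLE[key] would raise KeyError on a missing key; that is unreachable
-- (0 <= bull, bear and bull + bear <= 4, every such pair is in the table), so the
-- .getD 0 default is never taken.
def confidence_pct_alt (weekly : String) (daily : String) (h4 : String) (h1 : String) : Int :=
  let args := [weekly, daily, h4, h1]
  let bull := (args.map (fun v => if v = "Bullish" then (1 : Int) else 0)).sum
  let bear := (args.map (fun v => if v = "Bearish" then (1 : Int) else 0)).sum
  (PySem.Dict.get? pvTable (bull, bear)).getD 0

-- ===== PRECONDITION & SPEC =====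
def Spec_confidence_pct (weekly : String) (daily : String) (h4 : String) (h1 : String) (out : Int) : Prop := out = confidence_pct_alt weekly daily h4 h1
instance (weekly : String) (daily : String) (h4 : String) (h1 : String) (out : Int) : Decidable (Spec_confidence_pct weekly daily h4 h1 out) := by unfold Spec_confidence_pct; infer_instance

-- ===== CLAIM (what is proved, stated in full; the proofs are below) =====
def Claim_equal_confidence_pct : Prop := ∀ (weekly : String) (daily : String) (h4 : String) (h1 : String), Dom_confidence_pct weekly daily h4 h1 → Spec_confidence_pct weekly daily h4 h1 (confidence_pct weekly daily h4 h1)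

-- ===== LEMMAS AND PROOFS =====

-- ===== VERDICT (by name: the statement is the Claim_ definition above) =====
-- both ports depend on each argument only through the tests v = "Bullish" / v = "Bearish";
-- case-split every test and evaluate both closed results
theorem confidence_pct_spec : Claim_equal_confidence_pct := by
  intro weekly daily h4 h1 _
  show confidence_pct weekly daily h4 h1 = confidence_pct_alt weekly daily h4 h1
  by_cases hw1 : weekly = "Bullish" <;> by_cases hw2 : weekly = "Bearish" <;>
  by_cases hd1 : daily = "Bullish" <;> by_cases hd2 : daily = "Bearish" <;>
  by_cases h41 : h4 = "Bullish" <;> by_cases h42 : h4 = "Bearish" <;>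
  by_cases h11 : h1 = "Bullish" <;> by_cases h12 : h1 = "Bearish" <;>
  simp_all [confidence_pct, confidence_pct_alt, pyRoundDiv, pvTable,
    PySem.List.count, PySem.Int.floordiv, PySem.Dict.ofList, PySem.Dict.get?] <;> decide
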